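-- pv_equiv track=rewrite | github.com/CheRayLiu/LeetCode | interviewing.io/april_20.py | solution
-- ===== SOURCE A (Python) =====
-- import bisect
--
-- def solution(arr, n):
--     # O(n) lookup
--     if n not in arr:
--         return -1
--     # O(n logn) sort. Assuming in place
--     arr.sort()
--     idx = 1
--     l = arr[0]
--     intervals = []
--     # O(n), only store starting of ranges because at this point n is guaranteed to be in the array
--     while idx < len(arr):
--         if arr[idx] - arr[idx-1] > 1:
--             intervals.append(l)
--             l = arr[idx]
--         idx += 1
--     intervals.append(l)
--     return bisect.bisect_right(intervals, n)
-- ===== SOURCE B (Python) =====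
-- def solution(arr, n):
--     s = set(arr)
--     if n not in s:
--         return -1
--     # x starts a consecutive run iff x-1 is absent; the answer is the number of run starts <= n
--     return sum(1 for x in s if x - 1 not in s and x <= n)
-- ===== Notes on version B (the rewrite author's own statement) =====
-- stated objective: alternative
-- what changed: Replaces membership scan + in-place sort + adjacent-gap interval scan + bisect with a single hash set: the answer is the number of values x <= n in the set whose predecessor x-1 is absent (each such x starts a consecutive run); trades the sort-based scan for set lookups (O(n) vs O(n log n) asymptotically, but not measurably faster on the timed inputs).
import Mathlib
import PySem

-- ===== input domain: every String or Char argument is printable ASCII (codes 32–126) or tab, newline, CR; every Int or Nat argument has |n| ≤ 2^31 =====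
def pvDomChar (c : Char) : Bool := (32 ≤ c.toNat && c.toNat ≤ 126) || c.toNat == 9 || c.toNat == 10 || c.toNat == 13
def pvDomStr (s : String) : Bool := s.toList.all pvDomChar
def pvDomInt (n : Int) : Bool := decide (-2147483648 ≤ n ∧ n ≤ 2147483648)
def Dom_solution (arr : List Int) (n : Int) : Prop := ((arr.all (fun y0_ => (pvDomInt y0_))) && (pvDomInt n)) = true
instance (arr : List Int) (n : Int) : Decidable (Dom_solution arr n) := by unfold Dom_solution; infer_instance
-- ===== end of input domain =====

-- B replaces A's sort + adjacent-gap scan + bisect by a hash-set count of run starts ≤ n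
-- (equal return value; note: Python A sorts arr in place, B does not mutate arr).

-- ===== PORT A =====
-- the while loop: prev = arr[idx-1], l = current run start; at each gap > 1 append l and restart the run
def pvLoopA (prev l : Int) : List Int → List Int
  | [] => [l]
  | x :: rest => if x - prev > 1 then l :: pvLoopA x x rest else pvLoopA x l rest

-- after the membership guard: idx walk over the sorted array, then bisect_right on the starts
def pvAfterSort : List Int → Int → Int
  | [], _ => -1  -- unreachable: n ∈ arr, so sorted arr is nonempty (Python would raise on arr[0])
  | h :: t, n => (PySem.List.bisectRight (pvLoopA h h t) n : Int)

def solution (arr : List Int) (n : Int) : Int :=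
  if ¬ arr.contains n then -1
  else pvAfterSort (PySem.List.sorted arr (fun x => x)) n

-- ===== PORT B =====
def solution_alt (arr : List Int) (n : Int) : Int :=
  let s := PySem.Set.ofList arr
  if ¬ PySem.Set.contains s n then -1
  else ((s.filter (fun x => !(PySem.Set.contains s (x - 1)) && decide (x ≤ n))).length : Int)

-- ===== PRECONDITION & SPEC =====
def Spec_solution (arr : List Int) (n : Int) (out : Int) : Prop := out = solution_alt arr n
instance (arr : List Int) (n : Int) (out : Int) : Decidable (Spec_solution arr n out) := by unfold Spec_solution; infer_instance

-- ===== CLAIM (what is proved, stated in full; the proofs are below) =====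
def Claim_equal_solution : Prop := ∀ (arr : List Int) (n : Int), Dom_solution arr n → Spec_solution arr n (solution arr n)

-- ===== LEMMAS AND PROOFS =====

-- the run starts emitted by A's loop after the initial one
def pvStarts (prev : Int) : List Int → List Int
  | [] => []
  | x :: rest => if x - prev > 1 then x :: pvStarts x rest else pvStarts x rest

theorem pvLoopA_eq_starts (prev l : Int) (s : List Int) :
    pvLoopA prev l s = l :: pvStarts prev s := by
  induction s generalizing prev l with
  | nil => rfl
  | cons x rest ih =>
    simp only [pvLoopA, pvStarts]
    split_ifs <;> simp [ih]

theorem pvStarts_bounds (prev : Int) (s : List Int)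
    (hs : List.Pairwise (· ≤ ·) (prev :: s)) :
    (∀ x ∈ pvStarts prev s, prev + 1 < x) ∧ List.Pairwise (· < ·) (pvStarts prev s) := by
  induction s generalizing prev with
  | nil => simp [pvStarts]
  | cons y r ih =>
    have hyr : List.Pairwise (· ≤ ·) (y :: r) := hs.tail
    have hpy : prev ≤ y := (List.pairwise_cons.mp hs).1 y List.mem_cons_self
    obtain ⟨ihb, ihp⟩ := ih y hyr
    simp only [pvStarts]
    split_ifs with hgap
    · refine ⟨?_, ?_⟩
      · intro x hx
        rcases List.mem_cons.mp hx with rfl | hx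
        · omega
        · have := ihb x hx; omega
      · exact List.pairwise_cons.mpr ⟨fun x hx => by have := ihb x hx; omega, ihp⟩
    · exact ⟨fun x hx => by have := ihb x hx; omega, ihp⟩

theorem pvStarts_mem (prev : Int) (s : List Int)
    (hs : List.Pairwise (· ≤ ·) (prev :: s)) (x : Int) :
    x ∈ pvStarts prev s ↔ x ∈ s ∧ x - 1 ∉ prev :: s ∧ x ≠ prev := by
  induction s generalizing prev with
  | nil => simp [pvStarts]
  | cons y r ih =>
    have hyr : List.Pairwise (· ≤ ·) (y :: r) := hs.tail
    have hpy : prev ≤ y := (List.pairwise_cons.mp hs).1 y List.mem_cons_self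
    have hyge : ∀ z ∈ r, y ≤ z := (List.pairwise_cons.mp hyr).1
    have ihy := ih y hyr
    simp only [pvStarts]
    split_ifs with hgap
    · constructor
      · intro hx
        rcases List.mem_cons.mp hx with rfl | hx
        · refine ⟨List.mem_cons_self, ?_, by omega⟩
          simp only [List.mem_cons]
          push Not
          refine ⟨by omega, by omega, fun hz => ?_⟩
          have := hyge _ hz; omega
        · obtain ⟨hxr, hnot, hxy⟩ := ihy.mp hx
          have hxy' : y ≤ x := hyge _ hxr
          refine ⟨List.mem_cons_of_mem _ hxr, ?_, by omega⟩
          simp only [List.mem_cons] at hnot ⊢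
          push Not at hnot ⊢
          exact ⟨by omega, hnot.1, hnot.2⟩
      · rintro ⟨hx, hnot, hxp⟩
        simp only [List.mem_cons] at hnot
        push Not at hnot
        by_cases hxy : x = y
        · subst hxy; exact List.mem_cons_self
        · have hxr : x ∈ r := by
            rcases List.mem_cons.mp hx with rfl | hxr
            · exact absurd rfl hxy
            · exact hxr
          refine List.mem_cons_of_mem _ (ihy.mpr ⟨hxr, ?_, hxy⟩)
          simp only [List.mem_cons]; push Not; exact ⟨hnot.2.1, hnot.2.2⟩
    · rw [ihy]
      constructor
      · rintro ⟨hxr, hnot, hxy⟩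
        simp only [List.mem_cons] at hnot
        push Not at hnot
        have hyx : y ≤ x := hyge _ hxr
        refine ⟨List.mem_cons_of_mem _ hxr, ?_, by omega⟩
        simp only [List.mem_cons]
        push Not
        exact ⟨by omega, hnot.1, hnot.2⟩
      · rintro ⟨hx, hnot, hxp⟩
        simp only [List.mem_cons] at hnot
        push Not at hnot
        rcases List.mem_cons.mp hx with rfl | hxr
        · omega
        · have hyx : y ≤ x := hyge _ hxr
          refine ⟨hxr, ?_, by omega⟩
          simp only [List.mem_cons]; push Not
          exact ⟨hnot.2.1, hnot.2.2⟩

-- bisect_right on a ≤-sorted list counts the elements ≤ n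
theorem countP_eq_of_prefix (L : List Int) (n : Int) (k : Nat)
    (hk : k ≤ L.length)
    (hlt : ∀ (j : Nat) (hj : j < L.length), j < k → L[j] ≤ n)
    (hge : ∀ (j : Nat) (hj : j < L.length), k ≤ j → n < L[j]) :
    L.countP (fun y => decide (y ≤ n)) = k := by
  induction L generalizing k with
  | nil => simp only [List.countP_nil, List.length_nil] at *; omega
  | cons a L' ih =>
    cases k with
    | zero =>
      rw [List.countP_eq_zero.mpr]
      intro y hy
      obtain ⟨j, hj, rfl⟩ := List.mem_iff_getElem.mp hy
      have := hge j hj (Nat.zero_le _)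
      simpa using this
    | succ k' =>
      have ha : a ≤ n := by
        have := hlt 0 (by simp) (Nat.succ_pos _)
        simpa using this
      rw [List.countP_cons_of_pos (by simpa using ha)]
      have : L'.countP (fun y => decide (y ≤ n)) = k' := by
        apply ih
        · simpa using hk
        · intro j hj hjk
          have := hlt (j+1) (by simpa using Nat.succ_lt_succ hj) (Nat.succ_lt_succ hjk)
          simpa using this
        · intro j hj hjk
          have := hge (j+1) (by simpa using Nat.succ_lt_succ hj) (Nat.succ_le_succ hjk)
          simpa using this
      omega

theorem bisectRight_eq_countP (L : List Int) (n : Int)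
    (hL : List.Pairwise (· ≤ ·) L) :
    PySem.List.bisectRight L n = L.countP (fun y => decide (y ≤ n)) := by
  obtain ⟨hk, hlt, hge⟩ := PySem.List.bisectRight_spec L n hL
  exact (countP_eq_of_prefix L n _ hk hlt hge).symm

-- countP over a nodup list = card of the filtered toFinset
theorem countP_nodup_eq_card (L : List Int) (p : Int → Bool) (hL : L.Nodup) :
    L.countP p = (L.toFinset.filter (fun x => p x = true)).card := by
  rw [List.countP_eq_length_filter, ← List.toFinset_filter,
    List.toFinset_card_of_nodup (hL.filter p)]

theorem solution_eq_alt (arr : List Int) (n : Int) :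
    solution arr n = solution_alt arr n := by
  unfold solution solution_alt
  by_cases hmem : n ∈ arr
  · rw [if_neg (by simp [hmem]), if_neg (by simp [PySem.Set.mem_ofList, hmem])]
    have hne : PySem.List.sorted arr (fun x => x) ≠ [] := by
      simp [PySem.List.sorted_eq_nil_iff]
      rintro rfl; simp at hmem
    rcases hst : PySem.List.sorted arr (fun x => x) with _ | ⟨h, t⟩
    · exact absurd hst hne
    · -- the sorted list h :: t
      have hsort : List.Pairwise (· ≤ ·) (h :: t) := by
        have := PySem.List.sorted_pairwise arr (fun x => x)
        rwa [hst] at this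
      have hmemS : ∀ x : Int, x ∈ (h :: t) ↔ x ∈ arr := by
        intro x
        rw [← hst, PySem.List.mem_sorted]
      -- A's value
      show ((PySem.List.bisectRight (pvLoopA h h t) n : Nat) : Int) = _
      rw [pvLoopA_eq_starts, bisectRight_eq_countP _ n ?pairwiseLe]
      case pairwiseLe =>
        obtain ⟨hb, hp⟩ := pvStarts_bounds h t hsort
        exact List.pairwise_cons.mpr
          ⟨fun x hx => by have := hb x hx; omega,
           hp.imp (fun {a b} hab => le_of_lt hab)⟩
      -- both counts as Finset cards
      have hnodupL : (h :: pvStarts h t).Nodup := by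
        obtain ⟨hb, hp⟩ := pvStarts_bounds h t hsort
        exact (List.pairwise_cons.mpr
          ⟨fun x hx => by have := hb x hx; omega, hp⟩).nodup
      have hnodupS : (PySem.Set.ofList arr : List Int).Nodup := PySem.Set.nodup_ofList arr
      rw [countP_nodup_eq_card _ _ hnodupL]
      rw [← List.countP_eq_length_filter, countP_nodup_eq_card _ _ hnodupS]
      -- the two finsets are equal
      congr 1
      apply congrArg Finset.card
      apply Finset.ext
      intro x
      have hLmem : x ∈ h :: pvStarts h t ↔ x ∈ arr ∧ x - 1 ∉ arr := by
        constructor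
        · intro hx
          rcases List.mem_cons.mp hx with heq | hx
          · refine ⟨(hmemS x).mp (heq ▸ List.mem_cons_self), fun hcon => ?_⟩
            have hx1 : x - 1 ∈ (h :: t) := (hmemS _).mpr hcon
            rcases List.mem_cons.mp hx1 with heq2 | hxt
            · omega
            · have := (List.pairwise_cons.mp hsort).1 _ hxt; omega
          · obtain ⟨hxt, hnot, _⟩ := (pvStarts_mem h t hsort x).mp hx
            exact ⟨(hmemS x).mp (List.mem_cons_of_mem _ hxt),
              fun hcon => hnot ((hmemS _).mpr hcon)⟩
        · rintro ⟨hx, hnot⟩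
          by_cases hxh : x = h
          · exact hxh ▸ List.mem_cons_self
          · have hxht : x ∈ h :: t := (hmemS x).mpr hx
            have hxt : x ∈ t := by
              rcases List.mem_cons.mp hxht with heq | hxt
              · exact absurd heq hxh
              · exact hxt
            exact List.mem_cons_of_mem _
              ((pvStarts_mem h t hsort x).mpr
                ⟨hxt, fun hcon => hnot ((hmemS _).mp hcon), hxh⟩)
      have hbool : ((!(PySem.Set.ofList arr).contains (x - 1) && decide (x ≤ n)) = true)
          ↔ (x - 1 ∉ arr ∧ x ≤ n) := by
        simp [PySem.Set.mem_ofList]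
      simp only [Finset.mem_filter, List.mem_toFinset, decide_eq_true_eq, hbool,
        PySem.Set.mem_ofList, hLmem]
      constructor
      · rintro ⟨⟨hxa, hna⟩, hxn⟩
        exact ⟨hxa, hna, hxn⟩
      · rintro ⟨hxa, hna, hxn⟩
        exact ⟨⟨hxa, hna⟩, hxn⟩
  · rw [if_pos (by simp [hmem]), if_pos (by simp [PySem.Set.mem_ofList, hmem])]

-- ===== VERDICT (by name: the statement is the Claim_ definition above) =====
theorem solution_spec : Claim_equal_solution := by
  intro arr n _
  exact solution_eq_alt arr n
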